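-- pv_equiv track=rewrite | github.com/Siyoul-Jung/AI_MathMate | backend/engine_v2/modules/combinatorics/comb_multinomial_partition.py | _solve_internal
-- ===== SOURCE A (Python) =====
-- import math
--
-- def _solve_internal(T: int) -> int:
--     """
--     C + V + S = T, C > V > S >= 1 탐색 및 다항계수 합산
--     """
--     total_count = 0
--     # S >= 1, V > S => V >= 2, C > V => C >= 3. T >= 1+2+3 = 6.
--     for s in range(1, T // 3 + 1):
--         for v in range(s + 1, T):
--             c = T - s - v
--             if c > v:
--                 # T! / (C!V!S!)
--                 ways = math.factorial(T) // (math.factorial(c) * math.factorial(v) * math.factorial(s))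
--                 total_count += ways
--     return total_count % 1000
-- ===== SOURCE B (Python) =====
-- import math
--
-- def _solve_internal(T: int) -> int:
--     # Inclusion-exclusion closed form: the sum of T!/(c!v!s!) over ALL ordered positive
--     # triples c+v+s=T is 3**T - 3*2**T + 3 (surjections onto 3 labels); subtracting the
--     # tied triples (two or three equal parts) and dividing by the 6 orderings of a
--     # strictly decreasing triple gives the answer with a single O(T) loop over ties.
--     if T < 6:
--         return 0
--     ties = 0
--     for a in range(1, (T - 1) // 2 + 1):
--         b = T - 2 * a
--         if b == a:
--             ties += math.factorial(T) // math.factorial(a) ** 3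
--         else:
--             ties += 3 * (math.factorial(T) // (math.factorial(a) ** 2 * math.factorial(b)))
--     return ((3 ** T - 3 * 2 ** T + 3 - ties) // 6) % 1000
-- ===== Notes on version B (the rewrite author's own statement) =====
-- stated objective: faster
-- what changed: B replaces A's double loop over all (s,v) pairs by the inclusion-exclusion closed form: the sum of T!/(c!v!s!) over all ordered positive triples is 3^T - 3*2^T + 3, so B subtracts the tied triples (one O(T) loop over pairs (a,a,T-2a)) and divides by the 6 orderings of a strict triple.
import Mathlib
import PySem

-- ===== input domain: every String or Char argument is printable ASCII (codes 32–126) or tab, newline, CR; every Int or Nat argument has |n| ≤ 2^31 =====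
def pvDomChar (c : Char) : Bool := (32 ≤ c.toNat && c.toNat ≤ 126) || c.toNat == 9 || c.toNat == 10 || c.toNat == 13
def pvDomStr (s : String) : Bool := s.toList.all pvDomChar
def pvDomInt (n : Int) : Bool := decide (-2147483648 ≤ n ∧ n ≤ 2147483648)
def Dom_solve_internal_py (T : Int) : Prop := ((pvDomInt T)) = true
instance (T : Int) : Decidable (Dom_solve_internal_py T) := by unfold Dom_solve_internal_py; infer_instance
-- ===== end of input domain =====

-- B replaces A's double loop over all (s,v) pairs by the inclusion-exclusion closed form
-- 3^T - 3·2^T + 3 minus a single O(T) loop over tied triples, divided by 6; objective: faster.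

-- ===== PORT A =====
-- math.factorial m; every call site in either port passes a nonnegative value
def intFact (m : Int) : Int := (Nat.factorial m.toNat : Int)

def solve_internal_py (T : Int) : Int :=
  let total :=
    (PySem.List.pyRange 1 (PySem.Int.floordiv T 3 + 1) 1).foldl (fun total s =>
      (PySem.List.pyRange (s + 1) T 1).foldl (fun total v =>
        let c := T - s - v
        if c > v then
          total + PySem.Int.floordiv (intFact T) (intFact c * intFact v * intFact s)
        else total) total) 0
  PySem.Int.mod total 1000

-- ===== PORT B =====
-- 3 ** T and 2 ** T are reached only when 6 ≤ T, where the exponent is T.toNat exactly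
def solve_internal_py_alt (T : Int) : Int :=
  if T < 6 then 0
  else
    let ties :=
      (PySem.List.pyRange 1 (PySem.Int.floordiv (T - 1) 2 + 1) 1).foldl (fun ties a =>
        let b := T - 2 * a
        if b = a then
          ties + PySem.Int.floordiv (intFact T) (intFact a ^ 3)
        else
          ties + 3 * PySem.Int.floordiv (intFact T) (intFact a ^ 2 * intFact b)) 0
    PySem.Int.mod (PySem.Int.floordiv (3 ^ T.toNat - 3 * 2 ^ T.toNat + 3 - ties) 6) 1000

-- ===== PRECONDITION & SPEC =====
def Spec_solve_internal_py (T : Int) (out : Int) : Prop := out = solve_internal_py_alt T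
instance (T : Int) (out : Int) : Decidable (Spec_solve_internal_py T out) := by unfold Spec_solve_internal_py; infer_instance

-- ===== CLAIM (what is proved, stated in full; the proofs are below) =====
def Claim_equal_solve_internal_py : Prop := ∀ (T : Int), Dom_solve_internal_py T → Spec_solve_internal_py T (solve_internal_py T)

-- ===== LEMMAS AND PROOFS =====

-- the multinomial coefficient n! / (a! b! (n-a-b)!), as both programs compute it
def pvMult (n a b : ℕ) : ℕ := n.factorial / (a.factorial * b.factorial * (n - a - b).factorial)

def pvU (n : ℕ) : Finset (ℕ × ℕ) := Finset.range n ×ˢ Finset.range n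

-- the strict region s < v < c (A's summand set)
def pvX (n : ℕ) : ℕ :=
  ∑ p ∈ pvU n, if 1 ≤ p.1 ∧ p.1 < p.2 ∧ p.1 + 2 * p.2 < n then pvMult n p.1 p.2 else 0

-- all ordered positive pairs (s,v) with c ≥ 1
def pvS (n : ℕ) : ℕ :=
  ∑ p ∈ pvU n, if 1 ≤ p.1 ∧ 1 ≤ p.2 ∧ p.1 + p.2 < n then pvMult n p.1 p.2 else 0

-- tied triples, indexed by the repeated part a (b = n - 2a)
def pvTie (n : ℕ) : ℕ :=
  ∑ a ∈ Finset.range n,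
    if 1 ≤ a ∧ 2 * a < n then (if n = 3 * a then pvMult n a a else 3 * pvMult n a a) else 0

-- ℕ-shape of A's double loop
def pvA (n : ℕ) : ℕ :=
  ∑ k ∈ Finset.range (n / 3), ∑ j ∈ Finset.range (n - k - 2),
    if 1 + k + 2 * (k + 2 + j) < n then pvMult n (1 + k) (k + 2 + j) else 0

-- ℕ-shape of B's tie loop
def pvE (n : ℕ) : ℕ :=
  ∑ k ∈ Finset.range ((n - 1) / 2),
    if n = 3 * (1 + k) then pvMult n (1 + k) (1 + k) else 3 * pvMult n (1 + k) (1 + k)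

theorem pvMult_comm (n a b : ℕ) : pvMult n a b = pvMult n b a := by
  unfold pvMult
  rw [show n - a - b = n - b - a from by omega]
  congr 1
  ring

theorem pvMult_rot (n a b : ℕ) (h : a + b ≤ n) : pvMult n a b = pvMult n b (n - a - b) := by
  unfold pvMult
  rw [show n - b - (n - a - b) = a from by omega]
  congr 1
  ring

theorem pvMult_last (n a b : ℕ) (h : a + b ≤ n) : pvMult n a b = pvMult n a (n - a - b) := by
  rw [pvMult_comm, pvMult_rot n b a (by omega), show n - b - a = n - a - b from by omega]

theorem pvMult_eq_choose (n a b : ℕ) (h : a + b ≤ n) :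
    pvMult n a b = n.choose a * (n - a).choose b := by
  unfold pvMult
  refine Nat.div_eq_of_eq_mul_left ?_ ?_
  · positivity
  · have h1 : n.choose a * a.factorial * (n - a).factorial = n.factorial :=
      Nat.choose_mul_factorial_mul_factorial (by omega)
    have h2 : (n - a).choose b * b.factorial * (n - a - b).factorial = (n - a).factorial :=
      Nat.choose_mul_factorial_mul_factorial (by omega)
    calc n.factorial = n.choose a * a.factorial * (n - a).factorial := h1.symm
      _ = n.choose a * a.factorial * ((n - a).choose b * b.factorial * (n - a - b).factorial) := by
          rw [h2]
      _ = n.choose a * (n - a).choose b * (a.factorial * b.factorial * (n - a - b).factorial) := by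
          ring

theorem pv_fact_floordiv (n a b : ℕ) :
    PySem.Int.floordiv (intFact (n : ℤ))
      (intFact ((n : ℤ) - (a : ℤ) - (b : ℤ)) * intFact (b : ℤ) * intFact (a : ℤ))
      = ((pvMult n a b : ℕ) : ℤ) := by
  have hc : ((n : ℤ) - (a : ℤ) - (b : ℤ)).toNat = n - a - b := by omega
  have h1 : intFact ((n : ℤ) - (a : ℤ) - (b : ℤ)) = ((n - a - b).factorial : ℤ) := by
    simp [intFact, hc]
  have h2 : intFact (b : ℤ) = (b.factorial : ℤ) := by simp [intFact]
  have h3 : intFact (a : ℤ) = (a.factorial : ℤ) := by simp [intFact]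
  have h4 : intFact (n : ℤ) = (n.factorial : ℤ) := by simp [intFact]
  rw [h1, h2, h3, h4, show ((n - a - b).factorial : ℤ) * (b.factorial : ℤ) * (a.factorial : ℤ)
      = (((n - a - b).factorial * b.factorial * a.factorial : ℕ) : ℤ) from by push_cast; ring,
    PySem.Int.floordiv_natCast]
  unfold pvMult
  congr 2
  ring

theorem pv_sum_map_range {M : Type} [AddCommMonoid M] (f : ℕ → M) (K : ℕ) :
    ((List.range K).map f).sum = ∑ i ∈ Finset.range K, f i := by
  induction K with
  | zero => simp
  | succ k ih => rw [List.range_succ, List.map_append, List.sum_append, Finset.sum_range_succ, ih]; simp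

-- ===== A-side bridge =====

theorem pv_innerG (n k : ℕ) :
    ((PySem.List.pyRange (1 + (k : ℤ) + 1) (n : ℤ) 1).map (fun v =>
        if (n : ℤ) - (1 + (k : ℤ)) - v > v then
          PySem.Int.floordiv (intFact (n : ℤ))
            (intFact ((n : ℤ) - (1 + (k : ℤ)) - v) * intFact v * intFact (1 + (k : ℤ)))
        else 0)).sum
      = ((∑ j ∈ Finset.range (n - k - 2),
          if 1 + k + 2 * (k + 2 + j) < n then pvMult n (1 + k) (k + 2 + j) else 0 : ℕ) : ℤ) := by
  rw [PySem.List.pyRange_one, List.map_map, pv_sum_map_range]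
  rw [show ((n : ℤ) - (1 + (k : ℤ) + 1)).toNat = n - k - 2 from by omega]
  rw [Nat.cast_sum]
  refine Finset.sum_congr rfl ?_
  intro j hj
  simp only [Function.comp]
  have hv : 1 + (k : ℤ) + 1 + (j : ℤ) = ((k + 2 + j : ℕ) : ℤ) := by push_cast; ring
  have hs : 1 + (k : ℤ) = ((1 + k : ℕ) : ℤ) := by push_cast; ring
  rw [hv, hs]
  by_cases hcond : 1 + k + 2 * (k + 2 + j) < n
  · rw [if_pos (by omega), if_pos hcond]
    exact pv_fact_floordiv n (1 + k) (k + 2 + j)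
  · rw [if_neg (by omega), if_neg hcond]
    simp

theorem pv_portA (n : ℕ) : solve_internal_py (n : ℤ) = ((pvA n % 1000 : ℕ) : ℤ) := by
  unfold solve_internal_py
  have h3 : PySem.Int.floordiv (n : ℤ) 3 = ((n / 3 : ℕ) : ℤ) := by
    exact_mod_cast PySem.Int.floordiv_natCast n 3
  have hfun : (fun (total s : ℤ) =>
      (PySem.List.pyRange (s + 1) (n : ℤ) 1).foldl (fun total v =>
        let c := (n : ℤ) - s - v
        if c > v then
          total + PySem.Int.floordiv (intFact (n : ℤ)) (intFact c * intFact v * intFact s)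
        else total) total)
      = fun total s => total + ((PySem.List.pyRange (s + 1) (n : ℤ) 1).map (fun v =>
          if (n : ℤ) - s - v > v then
            PySem.Int.floordiv (intFact (n : ℤ)) (intFact ((n : ℤ) - s - v) * intFact v * intFact s)
          else 0)).sum := by
    funext total s
    rw [show (fun (total v : ℤ) =>
        let c := (n : ℤ) - s - v
        if c > v then
          total + PySem.Int.floordiv (intFact (n : ℤ)) (intFact c * intFact v * intFact s)
        else total)
        = fun (total v : ℤ) => total + (if (n : ℤ) - s - v > v then
            PySem.Int.floordiv (intFact (n : ℤ)) (intFact ((n : ℤ) - s - v) * intFact v * intFact s)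
          else 0) from funext fun t => funext fun v => by dsimp only; split <;> simp]
    exact PySem.List.foldl_add _ _ _
  rw [h3, hfun, PySem.List.foldl_add, zero_add, PySem.List.pyRange_one, List.map_map,
    pv_sum_map_range]
  rw [show (((n / 3 : ℕ) : ℤ) + 1 - 1).toNat = n / 3 from by omega]
  dsimp only [Function.comp]
  have hterm : ∀ k ∈ Finset.range (n / 3),
      ((PySem.List.pyRange (1 + (k : ℤ) + 1) (n : ℤ) 1).map (fun v =>
        if (n : ℤ) - (1 + (k : ℤ)) - v > v then
          PySem.Int.floordiv (intFact (n : ℤ))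
            (intFact ((n : ℤ) - (1 + (k : ℤ)) - v) * intFact v * intFact (1 + (k : ℤ)))
        else 0)).sum
      = ((∑ j ∈ Finset.range (n - k - 2),
          if 1 + k + 2 * (k + 2 + j) < n then pvMult n (1 + k) (k + 2 + j) else 0 : ℕ) : ℤ) :=
    fun k _ => pv_innerG n k
  rw [Finset.sum_congr rfl hterm, ← Nat.cast_sum]
  show PySem.Int.mod ((pvA n : ℕ) : ℤ) ((1000 : ℕ) : ℤ) = _
  rw [PySem.Int.mod_natCast]

-- reindex A's loop shape to the strict-region sum (6 ≤ n keeps Ico 1 (n/3+1) inside range n)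
theorem pv_pvA_eq_pvX (n : ℕ) (hn : 6 ≤ n) : pvA n = pvX n := by
  unfold pvA pvX pvU
  rw [Finset.sum_product]
  have inner : ∀ s : ℕ,
      (∑ v ∈ Finset.range n, if 1 ≤ s ∧ s < v ∧ s + 2 * v < n then pvMult n s v else 0)
      = if 1 ≤ s then ∑ j ∈ Finset.range (n - s - 1),
          if s + 2 * (s + 1 + j) < n then pvMult n s (s + 1 + j) else 0 else 0 := by
    intro s
    by_cases h1 : 1 ≤ s
    · rw [if_pos h1]
      have hsub : ∑ v ∈ Finset.Ico (s + 1) n, (if 1 ≤ s ∧ s < v ∧ s + 2 * v < n then pvMult n s v else 0)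
          = ∑ v ∈ Finset.range n, (if 1 ≤ s ∧ s < v ∧ s + 2 * v < n then pvMult n s v else 0) := by
        refine Finset.sum_subset ?_ ?_
        · intro x hx
          simp only [Finset.mem_Ico] at hx
          simp only [Finset.mem_range]
          omega
        · intro x hx hnx
          simp only [Finset.mem_range] at hx
          simp only [Finset.mem_Ico] at hnx
          rw [if_neg (by omega)]
      rw [← hsub, Finset.sum_Ico_eq_sum_range]
      rw [show n - (s + 1) = n - s - 1 from by omega]
      refine Finset.sum_congr rfl ?_
      intro j hj
      refine if_congr ?_ rfl rfl
      constructor <;> intro <;> omega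
    · rw [if_neg h1]
      refine Finset.sum_eq_zero ?_
      intro v hv
      rw [if_neg (by omega)]
  calc ∑ k ∈ Finset.range (n / 3), ∑ j ∈ Finset.range (n - k - 2),
        (if 1 + k + 2 * (k + 2 + j) < n then pvMult n (1 + k) (k + 2 + j) else 0)
      = ∑ k ∈ Finset.range (n / 3), (if 1 ≤ 1 + k then ∑ j ∈ Finset.range (n - (1 + k) - 1),
          if (1 + k) + 2 * ((1 + k) + 1 + j) < n then pvMult n (1 + k) ((1 + k) + 1 + j) else 0 else 0) := by
        refine Finset.sum_congr rfl ?_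
        intro k hk
        rw [if_pos (by omega)]
        rw [show n - (1 + k) - 1 = n - k - 2 from by omega]
        refine Finset.sum_congr rfl ?_
        intro j hj
        rw [show 1 + k + 1 + j = k + 2 + j from by omega]
    _ = ∑ s ∈ Finset.Ico 1 (n / 3 + 1), (if 1 ≤ s then ∑ j ∈ Finset.range (n - s - 1),
          if s + 2 * (s + 1 + j) < n then pvMult n s (s + 1 + j) else 0 else 0) := by
        rw [Finset.sum_Ico_eq_sum_range]
        rw [show n / 3 + 1 - 1 = n / 3 from by omega]
    _ = ∑ s ∈ Finset.range n, (if 1 ≤ s then ∑ j ∈ Finset.range (n - s - 1),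
          if s + 2 * (s + 1 + j) < n then pvMult n s (s + 1 + j) else 0 else 0) := by
        refine Finset.sum_subset ?_ ?_
        · intro x hx
          simp only [Finset.mem_Ico] at hx
          simp only [Finset.mem_range]
          omega
        · intro s hs hns
          simp only [Finset.mem_range] at hs
          simp only [Finset.mem_Ico] at hns
          by_cases h1 : 1 ≤ s
          · rw [if_pos h1]
            refine Finset.sum_eq_zero ?_
            intro j hj
            rw [if_neg (by omega)]
          · rw [if_neg h1]
    _ = ∑ s ∈ Finset.range n, ∑ v ∈ Finset.range n,
          (if 1 ≤ s ∧ s < v ∧ s + 2 * v < n then pvMult n s v else 0) := by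
        refine Finset.sum_congr rfl ?_
        intro s hs
        rw [inner s]

-- ===== B-side bridge =====

theorem pv_tiecast (n a : ℕ) (h2 : 2 * a < n) :
    (if (n : ℤ) - 2 * (a : ℤ) = (a : ℤ) then
        PySem.Int.floordiv (intFact (n : ℤ)) (intFact (a : ℤ) ^ 3)
      else
        3 * PySem.Int.floordiv (intFact (n : ℤ)) (intFact (a : ℤ) ^ 2 * intFact ((n : ℤ) - 2 * (a : ℤ))))
    = ((if n = 3 * a then pvMult n a a else 3 * pvMult n a a : ℕ) : ℤ) := by
  have hb : (n : ℤ) - 2 * (a : ℤ) = ((n - 2 * a : ℕ) : ℤ) := by omega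
  by_cases h3 : n = 3 * a
  · rw [if_pos (by omega), if_pos h3]
    have : intFact (a : ℤ) ^ 3
        = intFact ((n : ℤ) - (a : ℤ) - (a : ℤ)) * intFact (a : ℤ) * intFact (a : ℤ) := by
      rw [show (n : ℤ) - (a : ℤ) - (a : ℤ) = (a : ℤ) from by omega]
      ring
    rw [this, pv_fact_floordiv n a a]
  · rw [if_neg (by omega), if_neg h3]
    have : intFact (a : ℤ) ^ 2 * intFact ((n : ℤ) - 2 * (a : ℤ))
        = intFact ((n : ℤ) - (a : ℤ) - (a : ℤ)) * intFact (a : ℤ) * intFact (a : ℤ) := by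
      rw [show (n : ℤ) - (a : ℤ) - (a : ℤ) = (n : ℤ) - 2 * (a : ℤ) from by ring]
      ring
    rw [this, pv_fact_floordiv n a a]
    push_cast
    ring

theorem pv_portB (n : ℕ) (hn : 6 ≤ n) :
    solve_internal_py_alt (n : ℤ)
      = PySem.Int.mod (PySem.Int.floordiv
          ((3 : ℤ) ^ n - 3 * 2 ^ n + 3 - ((pvE n : ℕ) : ℤ)) 6) 1000 := by
  unfold solve_internal_py_alt
  rw [if_neg (by omega)]
  have h2 : PySem.Int.floordiv ((n : ℤ) - 1) 2 = (((n - 1) / 2 : ℕ) : ℤ) := by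
    rw [show (n : ℤ) - 1 = ((n - 1 : ℕ) : ℤ) from by omega]
    exact_mod_cast PySem.Int.floordiv_natCast (n - 1) 2
  have hfun : (fun (ties a : ℤ) =>
      let b := (n : ℤ) - 2 * a
      if b = a then ties + PySem.Int.floordiv (intFact (n : ℤ)) (intFact a ^ 3)
      else ties + 3 * PySem.Int.floordiv (intFact (n : ℤ)) (intFact a ^ 2 * intFact b))
      = fun ties a => ties + (if (n : ℤ) - 2 * a = a then
          PySem.Int.floordiv (intFact (n : ℤ)) (intFact a ^ 3)
        else 3 * PySem.Int.floordiv (intFact (n : ℤ)) (intFact a ^ 2 * intFact ((n : ℤ) - 2 * a))) := by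
    funext ties a
    dsimp only
    split <;> rfl
  rw [h2, hfun, PySem.List.foldl_add, zero_add, PySem.List.pyRange_one, List.map_map,
    pv_sum_map_range]
  rw [show ((((n - 1) / 2 : ℕ) : ℤ) + 1 - 1).toNat = (n - 1) / 2 from by omega]
  dsimp only [Function.comp]
  have hterm : ∀ k ∈ Finset.range ((n - 1) / 2),
      (if (n : ℤ) - 2 * (1 + (k : ℤ)) = 1 + (k : ℤ) then
          PySem.Int.floordiv (intFact (n : ℤ)) (intFact (1 + (k : ℤ)) ^ 3)
        else 3 * PySem.Int.floordiv (intFact (n : ℤ))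
          (intFact (1 + (k : ℤ)) ^ 2 * intFact ((n : ℤ) - 2 * (1 + (k : ℤ)))))
      = ((if n = 3 * (1 + k) then pvMult n (1 + k) (1 + k)
          else 3 * pvMult n (1 + k) (1 + k) : ℕ) : ℤ) := by
    intro k hk
    simp only [Finset.mem_range] at hk
    have hs : 1 + (k : ℤ) = ((1 + k : ℕ) : ℤ) := by push_cast; ring
    rw [hs]
    exact pv_tiecast n (1 + k) (by omega)
  rw [Finset.sum_congr rfl hterm, ← Nat.cast_sum]
  rfl

theorem pv_pvE_eq_pvTie (n : ℕ) (hn : 1 ≤ n) : pvE n = pvTie n := by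
  unfold pvE pvTie
  calc ∑ k ∈ Finset.range ((n - 1) / 2),
        (if n = 3 * (1 + k) then pvMult n (1 + k) (1 + k) else 3 * pvMult n (1 + k) (1 + k))
      = ∑ a ∈ Finset.Ico 1 ((n - 1) / 2 + 1),
          (if 1 ≤ a ∧ 2 * a < n then (if n = 3 * a then pvMult n a a else 3 * pvMult n a a) else 0) := by
        rw [Finset.sum_Ico_eq_sum_range, show (n - 1) / 2 + 1 - 1 = (n - 1) / 2 from by omega]
        refine Finset.sum_congr rfl ?_
        intro k hk
        simp only [Finset.mem_range] at hk
        have hc : 1 ≤ 1 + k ∧ 2 * (1 + k) < n := by omega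
        rw [if_pos hc]
    _ = ∑ a ∈ Finset.range n,
          (if 1 ≤ a ∧ 2 * a < n then (if n = 3 * a then pvMult n a a else 3 * pvMult n a a) else 0) := by
        refine Finset.sum_subset ?_ ?_
        · intro x hx
          simp only [Finset.mem_Ico] at hx
          simp only [Finset.mem_range]
          omega
        · intro a ha hna
          simp only [Finset.mem_range] at ha
          simp only [Finset.mem_Ico] at hna
          rw [if_neg (by omega)]

-- ===== the symmetry identity pvS = 6 pvX + pvTie =====

-- regions of pvS by the order type of (s, v, c) with c = n - s - v
def pvSlt (n : ℕ) : ℕ :=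
  ∑ p ∈ pvU n, if 1 ≤ p.1 ∧ p.1 < p.2 ∧ p.1 + p.2 < n then pvMult n p.1 p.2 else 0
def pvSgt (n : ℕ) : ℕ :=
  ∑ p ∈ pvU n, if 1 ≤ p.2 ∧ p.2 < p.1 ∧ p.1 + p.2 < n then pvMult n p.1 p.2 else 0
def pvSeq (n : ℕ) : ℕ :=
  ∑ p ∈ pvU n, if 1 ≤ p.1 ∧ p.1 = p.2 ∧ p.1 + p.2 < n then pvMult n p.1 p.2 else 0
def pvR2 (n : ℕ) : ℕ :=
  ∑ p ∈ pvU n, if 1 ≤ p.1 ∧ 2 * p.1 + p.2 < n ∧ n < p.1 + 2 * p.2 then pvMult n p.1 p.2 else 0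
def pvR3 (n : ℕ) : ℕ :=
  ∑ p ∈ pvU n, if p.1 < p.2 ∧ p.1 + p.2 < n ∧ n < 2 * p.1 + p.2 then pvMult n p.1 p.2 else 0
def pvT1 (n : ℕ) : ℕ :=
  ∑ p ∈ pvU n, if 1 ≤ p.1 ∧ p.1 < p.2 ∧ p.1 + 2 * p.2 = n then pvMult n p.1 p.2 else 0
def pvT2 (n : ℕ) : ℕ :=
  ∑ p ∈ pvU n, if 1 ≤ p.1 ∧ p.1 < p.2 ∧ 2 * p.1 + p.2 = n then pvMult n p.1 p.2 else 0
def pvE1 (n : ℕ) : ℕ :=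
  ∑ a ∈ Finset.range n, if 2 * a < n ∧ n < 3 * a then pvMult n a a else 0
def pvE2 (n : ℕ) : ℕ :=
  ∑ a ∈ Finset.range n, if 1 ≤ a ∧ 3 * a < n then pvMult n a a else 0
def pvE3 (n : ℕ) : ℕ :=
  ∑ a ∈ Finset.range n, if 1 ≤ a ∧ 2 * a < n then pvMult n a a else 0

theorem pvS_eq3 (n : ℕ) : pvS n = pvSlt n + pvSgt n + pvSeq n := by
  unfold pvS pvSlt pvSgt pvSeq
  rw [← Finset.sum_add_distrib, ← Finset.sum_add_distrib]
  refine Finset.sum_congr rfl ?_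
  intro p hp
  rcases p with ⟨s, v⟩
  dsimp only
  split_ifs <;> omega

theorem pvSgt_eq (n : ℕ) : pvSgt n = pvSlt n := by
  unfold pvSgt pvSlt
  refine Finset.sum_nbij' Prod.swap Prod.swap ?_ ?_ ?_ ?_ ?_
  · intro p hp
    simp only [pvU, Finset.mem_product, Finset.mem_range] at *
    exact ⟨hp.2, hp.1⟩
  · intro p hp
    simp only [pvU, Finset.mem_product, Finset.mem_range] at *
    exact ⟨hp.2, hp.1⟩
  · intro p hp; rfl
  · intro p hp; rfl
  · intro p hp
    rcases p with ⟨s, v⟩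
    dsimp only [Prod.swap]
    rw [pvMult_comm n s v]
    refine if_congr ?_ rfl rfl
    constructor <;> intro h <;> omega

theorem pvSlt_eq5 (n : ℕ) : pvSlt n = pvX n + pvR2 n + pvR3 n + pvT1 n + pvT2 n := by
  unfold pvSlt pvX pvR2 pvR3 pvT1 pvT2
  rw [← Finset.sum_add_distrib, ← Finset.sum_add_distrib, ← Finset.sum_add_distrib,
    ← Finset.sum_add_distrib]
  refine Finset.sum_congr rfl ?_
  intro p hp
  rcases p with ⟨s, v⟩
  dsimp only
  split_ifs <;> omega

theorem pvR2_eq (n : ℕ) : pvR2 n = pvX n := by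
  unfold pvR2 pvX
  rw [← Finset.sum_filter (fun p : ℕ × ℕ => 1 ≤ p.1 ∧ 2 * p.1 + p.2 < n ∧ n < p.1 + 2 * p.2)
      (fun p => pvMult n p.1 p.2),
    ← Finset.sum_filter (fun p : ℕ × ℕ => 1 ≤ p.1 ∧ p.1 < p.2 ∧ p.1 + 2 * p.2 < n)
      (fun p => pvMult n p.1 p.2)]
  refine Finset.sum_nbij' (fun p => (p.1, n - p.1 - p.2)) (fun q => (q.1, n - q.1 - q.2))
    ?_ ?_ ?_ ?_ ?_
  · rintro ⟨a, b⟩ hp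
    simp only [pvU, Finset.mem_filter, Finset.mem_product, Finset.mem_range] at hp ⊢
    omega
  · rintro ⟨a, b⟩ hq
    simp only [pvU, Finset.mem_filter, Finset.mem_product, Finset.mem_range] at hq ⊢
    omega
  · rintro ⟨a, b⟩ hp
    simp only [pvU, Finset.mem_filter, Finset.mem_product, Finset.mem_range] at hp
    simp only [Prod.mk.injEq]
    constructor <;> first | trivial | omega
  · rintro ⟨a, b⟩ hq
    simp only [pvU, Finset.mem_filter, Finset.mem_product, Finset.mem_range] at hq
    simp only [Prod.mk.injEq]
    constructor <;> first | trivial | omega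
  · rintro ⟨a, b⟩ hp
    simp only [pvU, Finset.mem_filter, Finset.mem_product, Finset.mem_range] at hp
    exact pvMult_last n a b (by omega)

theorem pvR3_eq (n : ℕ) : pvR3 n = pvX n := by
  unfold pvR3 pvX
  rw [← Finset.sum_filter (fun p : ℕ × ℕ => p.1 < p.2 ∧ p.1 + p.2 < n ∧ n < 2 * p.1 + p.2)
      (fun p => pvMult n p.1 p.2),
    ← Finset.sum_filter (fun p : ℕ × ℕ => 1 ≤ p.1 ∧ p.1 < p.2 ∧ p.1 + 2 * p.2 < n)
      (fun p => pvMult n p.1 p.2)]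
  refine Finset.sum_nbij' (fun p => (n - p.1 - p.2, p.1)) (fun q => (q.2, n - q.1 - q.2))
    ?_ ?_ ?_ ?_ ?_
  · rintro ⟨a, b⟩ hp
    simp only [pvU, Finset.mem_filter, Finset.mem_product, Finset.mem_range] at hp ⊢
    omega
  · rintro ⟨a, b⟩ hq
    simp only [pvU, Finset.mem_filter, Finset.mem_product, Finset.mem_range] at hq ⊢
    omega
  · rintro ⟨a, b⟩ hp
    simp only [pvU, Finset.mem_filter, Finset.mem_product, Finset.mem_range] at hp
    simp only [Prod.mk.injEq]
    constructor <;> first | trivial | omega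
  · rintro ⟨a, b⟩ hq
    simp only [pvU, Finset.mem_filter, Finset.mem_product, Finset.mem_range] at hq
    simp only [Prod.mk.injEq]
    constructor <;> first | trivial | omega
  · rintro ⟨a, b⟩ hp
    simp only [pvU, Finset.mem_filter, Finset.mem_product, Finset.mem_range] at hp
    dsimp only
    rw [pvMult_comm n (n - a - b) a, ← pvMult_last n a b (by omega)]

theorem pvT1_eq (n : ℕ) : pvT1 n = pvE1 n := by
  unfold pvT1 pvE1
  rw [← Finset.sum_filter (fun p : ℕ × ℕ => 1 ≤ p.1 ∧ p.1 < p.2 ∧ p.1 + 2 * p.2 = n)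
      (fun p => pvMult n p.1 p.2),
    ← Finset.sum_filter (fun a : ℕ => 2 * a < n ∧ n < 3 * a) (fun a => pvMult n a a)]
  refine Finset.sum_nbij' (fun p => p.2) (fun a => (n - 2 * a, a)) ?_ ?_ ?_ ?_ ?_
  · rintro ⟨a, b⟩ hp
    simp only [pvU, Finset.mem_filter, Finset.mem_product, Finset.mem_range] at hp ⊢
    omega
  · intro a ha
    simp only [pvU, Finset.mem_filter, Finset.mem_product, Finset.mem_range] at ha ⊢
    omega
  · rintro ⟨a, b⟩ hp
    simp only [pvU, Finset.mem_filter, Finset.mem_product, Finset.mem_range] at hp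
    simp only [Prod.mk.injEq]
    constructor <;> first | trivial | omega
  · intro a ha; rfl
  · rintro ⟨a, b⟩ hp
    simp only [pvU, Finset.mem_filter, Finset.mem_product, Finset.mem_range] at hp
    dsimp only
    rw [show a = n - 2 * b from by omega, pvMult_rot n (n - 2 * b) b (by omega),
      show n - (n - 2 * b) - b = b from by omega]

theorem pvT2_eq (n : ℕ) : pvT2 n = pvE2 n := by
  unfold pvT2 pvE2
  rw [← Finset.sum_filter (fun p : ℕ × ℕ => 1 ≤ p.1 ∧ p.1 < p.2 ∧ 2 * p.1 + p.2 = n)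
      (fun p => pvMult n p.1 p.2),
    ← Finset.sum_filter (fun a : ℕ => 1 ≤ a ∧ 3 * a < n) (fun a => pvMult n a a)]
  refine Finset.sum_nbij' (fun p => p.1) (fun a => (a, n - 2 * a)) ?_ ?_ ?_ ?_ ?_
  · rintro ⟨a, b⟩ hp
    simp only [pvU, Finset.mem_filter, Finset.mem_product, Finset.mem_range] at hp ⊢
    omega
  · intro a ha
    simp only [pvU, Finset.mem_filter, Finset.mem_product, Finset.mem_range] at ha ⊢
    omega
  · rintro ⟨a, b⟩ hp
    simp only [pvU, Finset.mem_filter, Finset.mem_product, Finset.mem_range] at hp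
    simp only [Prod.mk.injEq]
    constructor <;> first | trivial | omega
  · intro a ha; rfl
  · rintro ⟨a, b⟩ hp
    simp only [pvU, Finset.mem_filter, Finset.mem_product, Finset.mem_range] at hp
    dsimp only
    rw [show b = n - 2 * a from by omega, ← show n - a - a = n - 2 * a from by omega,
      ← pvMult_last n a a (by omega)]

theorem pvSeq_eq (n : ℕ) : pvSeq n = pvE3 n := by
  unfold pvSeq pvE3
  rw [← Finset.sum_filter (fun p : ℕ × ℕ => 1 ≤ p.1 ∧ p.1 = p.2 ∧ p.1 + p.2 < n)
      (fun p => pvMult n p.1 p.2),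
    ← Finset.sum_filter (fun a : ℕ => 1 ≤ a ∧ 2 * a < n) (fun a => pvMult n a a)]
  refine Finset.sum_nbij' (fun p => p.1) (fun a => (a, a)) ?_ ?_ ?_ ?_ ?_
  · rintro ⟨a, b⟩ hp
    simp only [pvU, Finset.mem_filter, Finset.mem_product, Finset.mem_range] at hp ⊢
    omega
  · intro a ha
    simp only [pvU, Finset.mem_filter, Finset.mem_product, Finset.mem_range,
      true_and] at ha ⊢
    omega
  · rintro ⟨a, b⟩ hp
    simp only [pvU, Finset.mem_filter, Finset.mem_product, Finset.mem_range] at hp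
    simp only [Prod.mk.injEq]
    constructor <;> first | trivial | omega
  · intro a ha; rfl
  · rintro ⟨a, b⟩ hp
    simp only [pvU, Finset.mem_filter, Finset.mem_product, Finset.mem_range] at hp
    dsimp only
    rw [show b = a from by omega]

theorem pvTie_eq (n : ℕ) : pvTie n = 2 * pvE1 n + 2 * pvE2 n + pvE3 n := by
  unfold pvTie pvE1 pvE2 pvE3
  rw [Finset.mul_sum, Finset.mul_sum, ← Finset.sum_add_distrib, ← Finset.sum_add_distrib]
  refine Finset.sum_congr rfl ?_
  intro a ha
  split_ifs <;> omega

theorem pv_split (n : ℕ) : pvS n = 6 * pvX n + pvTie n := by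
  have h1 := pvS_eq3 n
  have h2 := pvSgt_eq n
  have h3 := pvSlt_eq5 n
  have h4 := pvR2_eq n
  have h5 := pvR3_eq n
  have h6 := pvT1_eq n
  have h7 := pvT2_eq n
  have h8 := pvSeq_eq n
  have h9 := pvTie_eq n
  omega

-- ===== the closed form pvS + 3·2^n = 3^n + 3 =====

theorem pv_strip {M : Type} [AddCommMonoid M] (m : ℕ) (hm : 1 ≤ m) (f : ℕ → M) :
    ∑ v ∈ Finset.range (m + 1), f v = f 0 + (∑ v ∈ Finset.Ico 1 m, f v + f m) := by
  rw [Finset.range_eq_Ico, Finset.sum_eq_sum_Ico_succ_bot (by omega) f,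
    Finset.sum_Ico_succ_top (by omega) f]

theorem pv_pvS_choose (n : ℕ) :
    pvS n = ∑ s ∈ Finset.Ico 1 n, n.choose s * ∑ v ∈ Finset.Ico 1 (n - s), (n - s).choose v := by
  unfold pvS pvU
  rw [Finset.sum_product]
  have inner : ∀ s ∈ Finset.range n,
      (∑ v ∈ Finset.range n, if 1 ≤ s ∧ 1 ≤ v ∧ s + v < n then pvMult n s v else 0)
      = if 1 ≤ s then n.choose s * ∑ v ∈ Finset.Ico 1 (n - s), (n - s).choose v else 0 := by
    intro s hs
    by_cases h1 : 1 ≤ s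
    · rw [if_pos h1, Finset.mul_sum]
      have hsub : ∑ v ∈ Finset.Ico 1 (n - s), n.choose s * (n - s).choose v
          = ∑ v ∈ Finset.range n, (if 1 ≤ v ∧ s + v < n then n.choose s * (n - s).choose v else 0) := by
        rw [← Finset.sum_filter (fun v => 1 ≤ v ∧ s + v < n)
          (fun v => n.choose s * (n - s).choose v)]
        refine Finset.sum_congr ?_ (fun _ _ => rfl)
        ext v
        simp only [Finset.mem_Ico, Finset.mem_filter, Finset.mem_range]
        omega
      rw [hsub]
      refine Finset.sum_congr rfl ?_
      intro v hv
      by_cases hc : 1 ≤ v ∧ s + v < n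
      · rw [if_pos ⟨h1, hc.1, hc.2⟩, if_pos hc, pvMult_eq_choose n s v (by omega)]
      · rw [if_neg (by omega), if_neg hc]
    · rw [if_neg h1]
      refine Finset.sum_eq_zero ?_
      intro v hv
      rw [if_neg (by omega)]
  rw [Finset.sum_congr rfl inner]
  have h1 : ∑ s ∈ Finset.Ico 1 n,
        (if 1 ≤ s then n.choose s * ∑ v ∈ Finset.Ico 1 (n - s), (n - s).choose v else 0)
      = ∑ s ∈ Finset.range n,
        (if 1 ≤ s then n.choose s * ∑ v ∈ Finset.Ico 1 (n - s), (n - s).choose v else 0) := by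
    refine Finset.sum_subset ?_ ?_
    · intro x hx
      simp only [Finset.mem_Ico] at hx
      simp only [Finset.mem_range]
      omega
    · intro s hs hns
      simp only [Finset.mem_range] at hs
      simp only [Finset.mem_Ico] at hns
      rw [if_neg (by omega)]
  rw [← h1]
  refine Finset.sum_congr rfl ?_
  intro s hs
  simp only [Finset.mem_Ico] at hs
  rw [if_pos hs.1]

theorem pv_closed (n : ℕ) (hn : 1 ≤ n) : pvS n + 3 * 2 ^ n = 3 ^ n + 3 := by
  -- inner binomial sum: for 1 ≤ s < n, ∑_{v=1}^{n-s-1} C(n-s,v) + 2 = 2^(n-s)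
  have hW : ∀ s ∈ Finset.Ico 1 n, (∑ v ∈ Finset.Ico 1 (n - s), (n - s).choose v) + 2 = 2 ^ (n - s) := by
    intro s hs
    simp only [Finset.mem_Ico] at hs
    set m := n - s with hm
    have hm1 : 1 ≤ m := by omega
    have := Nat.sum_range_choose m
    rw [pv_strip m hm1 (fun v => m.choose v)] at this
    simp only [Nat.choose_zero_right, Nat.choose_self] at this
    omega
  -- ∑_{s=1}^{n-1} C(n,s) + 2 = 2^n
  have hA : (∑ s ∈ Finset.Ico 1 n, n.choose s) + 2 = 2 ^ n := by
    have := Nat.sum_range_choose n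
    rw [pv_strip n hn (fun s => n.choose s)] at this
    simp only [Nat.choose_zero_right, Nat.choose_self] at this
    omega
  -- ∑_{s=1}^{n-1} C(n,s)·2^(n-s) + 2^n + 1 = 3^n
  have hB : (∑ s ∈ Finset.Ico 1 n, n.choose s * 2 ^ (n - s)) + 2 ^ n + 1 = 3 ^ n := by
    have h3 : (3 : ℕ) ^ n = ∑ m ∈ Finset.range (n + 1), 2 ^ (n - m) * n.choose m := by
      have := add_pow (R := ℕ) 1 2 n
      simpa using this
    rw [pv_strip n hn (fun m => 2 ^ (n - m) * n.choose m)] at h3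
    simp only [Nat.choose_zero_right, Nat.choose_self, Nat.sub_self, pow_zero, Nat.sub_zero,
      mul_one] at h3
    have hcomm : ∑ s ∈ Finset.Ico 1 n, n.choose s * 2 ^ (n - s)
        = ∑ s ∈ Finset.Ico 1 n, 2 ^ (n - s) * n.choose s := by
      refine Finset.sum_congr rfl ?_
      intro s _
      ring
    omega
  -- combine: pvS + 2·∑C = ∑ C·2^(n-s)
  have hMain : pvS n + 2 * ∑ s ∈ Finset.Ico 1 n, n.choose s
      = ∑ s ∈ Finset.Ico 1 n, n.choose s * 2 ^ (n - s) := by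
    rw [pv_pvS_choose n, Finset.mul_sum, ← Finset.sum_add_distrib]
    refine Finset.sum_congr rfl ?_
    intro s hs
    have := hW s hs
    calc n.choose s * (∑ v ∈ Finset.Ico 1 (n - s), (n - s).choose v) + 2 * n.choose s
        = n.choose s * ((∑ v ∈ Finset.Ico 1 (n - s), (n - s).choose v) + 2) := by ring
      _ = n.choose s * 2 ^ (n - s) := by rw [this]
  omega

-- ===== small inputs =====

theorem pv_small (T : Int) (hT : T < 3) : solve_internal_py T = 0 := by
  unfold solve_internal_py
  have h : PySem.Int.floordiv T 3 + 1 ≤ 1 := by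
    have := (PySem.Int.floordiv_lt_iff_lt_mul (a := T) (b := 3) (q := 1) (by norm_num)).mpr
      (by omega)
    omega
  rw [PySem.List.pyRange_one_eq_nil h]
  show PySem.Int.mod 0 1000 = 0
  rfl

-- ===== VERDICT (by name: the statement is the Claim_ definition above) =====
theorem solve_internal_py_spec : Claim_equal_solve_internal_py := by
  intro T _
  unfold Spec_solve_internal_py
  by_cases h6 : T < 6
  · rw [show solve_internal_py_alt T = 0 from by unfold solve_internal_py_alt; rw [if_pos h6]]
    by_cases h3 : T < 3
    · exact pv_small T h3
    · interval_cases T <;> decide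
  · have hn : T = ((T.toNat : ℕ) : ℤ) := by omega
    set n := T.toNat with hdef
    have hn6 : 6 ≤ n := by omega
    rw [hn, pv_portA n, pv_portB n hn6, pv_pvE_eq_pvTie n (by omega)]
    have hS := pv_split n
    have hC := pv_closed n (by omega)
    have key : (3 : ℤ) ^ n - 3 * 2 ^ n + 3 - ((pvTie n : ℕ) : ℤ) = 6 * ((pvX n : ℕ) : ℤ) := by
      have h1 : ((pvS n : ℕ) : ℤ) = 6 * ((pvX n : ℕ) : ℤ) + ((pvTie n : ℕ) : ℤ) := by
        exact_mod_cast congrArg (fun m : ℕ => (m : ℤ)) hS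
      have h2 : ((pvS n : ℕ) : ℤ) + 3 * 2 ^ n = 3 ^ n + 3 := by
        have := congrArg (fun m : ℕ => (m : ℤ)) hC
        push_cast at this
        linarith
      linarith
    rw [key]
    have hdiv : PySem.Int.floordiv (6 * ((pvX n : ℕ) : ℤ)) 6 = ((pvX n : ℕ) : ℤ) := by
      rw [PySem.Int.floordiv_eq_ediv_of_pos (by norm_num)]
      exact Int.mul_ediv_cancel_left _ (by norm_num)
    rw [hdiv]
    have : PySem.Int.mod ((pvX n : ℕ) : ℤ) 1000 = ((pvX n % 1000 : ℕ) : ℤ) := by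
      exact_mod_cast PySem.Int.mod_natCast (pvX n) 1000
    rw [this, pv_pvA_eq_pvX n hn6]
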